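-- pv_equiv track=rewrite | github.com/KenKarrasch/Adventofcode | 2023/23-13.py | getrc
-- ===== SOURCE A (Python) =====
-- def hr(r,g):
--     gd = False
--     for rd in range(min(len(g)-r-1,r+1)):
--       gd = True
--       for c in range(len(g[0])):
--         if g[r-rd][c] != g[1+r+rd][c]:
--             return False
--     return gd
--
-- def vr(c,g):
--     gd = False
--     for cd in range(min(len(g[0])-c-1,c+1)):
--       gd = True
--       for r in range(len(g)):
--         if g[r][c-cd] != g[r][1+c+cd]:
--           return False
--     return gd
--
-- def getrc(g):
--     cs = [0]
--     rs = [0]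
--     for r in range(len(g)-1):
--       if hr(r,g):
--         rs.append(r+1)
--     for c in range(len(g[0])-1):
--       if vr(c,g):
--         cs.append(c+1)
--     return [rs[:],cs[:]]
-- ===== SOURCE B (Python) =====
-- def getrc(g):
--     def mirrors(lines):
--         n = len(lines)
--         bad = {(a + b + 1) // 2
--                for a in range(n)
--                for b in range(a + 1, n, 2)
--                if lines[a] != lines[b]}
--         return [0] + [i for i in range(1, n) if i not in bad]
--     w = len(g[0])
--     rows = [r[:w] for r in g]
--     cols = list(zip(*g))
--     return [mirrors(rows), mirrors(cols)]
-- ===== Notes on version B (the rewrite author's own statement) =====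
-- stated objective: alternative
-- what changed: Inverts the iteration: instead of testing each candidate split by expanding outward around it cell by cell (hr/vr), B scans every odd-distance line pair once, marks in a bad-set the unique split a mismatching pair invalidates, and emits the splits left unmarked; run on the rows (truncated to row 0's width, the only columns A reads) and on the transposed grid.
-- outside the precondition, e.g. on getrc(['abbc', 'xbb']): A returns [[0], [0]], B returns [[0], [0, 2]]
import Mathlib
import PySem

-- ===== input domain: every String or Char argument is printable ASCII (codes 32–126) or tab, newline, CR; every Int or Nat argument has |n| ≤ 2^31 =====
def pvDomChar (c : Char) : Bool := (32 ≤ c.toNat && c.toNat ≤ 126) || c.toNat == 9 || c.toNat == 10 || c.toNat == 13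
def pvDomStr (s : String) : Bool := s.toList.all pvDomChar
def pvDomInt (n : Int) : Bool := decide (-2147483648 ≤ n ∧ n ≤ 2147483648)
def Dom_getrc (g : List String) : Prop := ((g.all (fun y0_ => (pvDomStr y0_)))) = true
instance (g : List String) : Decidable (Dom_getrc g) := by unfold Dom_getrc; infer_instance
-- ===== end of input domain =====

-- B inverts A's iteration: instead of testing each candidate split by expanding outward
-- around it (hr/vr), B scans every odd-distance line pair once, marks in a set the unique
-- split a mismatching pair invalidates, and emits the splits left unmarked — run on the
-- rows (truncated to row 0's width, the only columns A reads) and on the transposed grid.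
-- Objective: alternative algorithm. Equal on nonempty grids whose rows are at least as
-- long as row 0 (Pre_).

-- ===== PORT A =====
-- g[i][c], exact while 0 ≤ i < len g and 0 ≤ c < len(g[i]) (guaranteed by Pre_ along every access)
def pvCell (g : List String) (i c : Int) : Char :=
  PySem.List.pyGetD ((PySem.List.pyGet? g i).getD "").toList c ' '

def hrA (r : Int) (g : List String) : Bool :=
  (!(PySem.List.pyRange 0 (min ((g.length : Int) - r - 1) (r + 1)) 1).isEmpty) &&
  (PySem.List.pyRange 0 (min ((g.length : Int) - r - 1) (r + 1)) 1).all (fun rd =>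
    (PySem.List.pyRange 0 (((g.headD "").toList.length : Int)) 1).all (fun c =>
      pvCell g (r - rd) c == pvCell g (1 + r + rd) c))

def vrA (c : Int) (g : List String) : Bool :=
  (!(PySem.List.pyRange 0 (min ((((g.headD "").toList.length : Int)) - c - 1) (c + 1)) 1).isEmpty) &&
  (PySem.List.pyRange 0 (min ((((g.headD "").toList.length : Int)) - c - 1) (c + 1)) 1).all (fun cd =>
    (PySem.List.pyRange 0 ((g.length : Int)) 1).all (fun r =>
      pvCell g r (c - cd) == pvCell g r (1 + c + cd)))

def getrc (g : List String) : List (List Int) :=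
  let rs : List Int :=
    (PySem.List.pyRange 0 ((g.length : Int) - 1) 1).foldl
      (fun acc r => if hrA r g then acc ++ [r + 1] else acc) [0]
  let cs : List Int :=
    (PySem.List.pyRange 0 ((((g.headD "").toList.length : Int)) - 1) 1).foldl
      (fun acc c => if vrA c g then acc ++ [c + 1] else acc) [0]
  [rs, cs]

-- ===== PORT B =====
-- the elements of the set comprehension {(a+b+1)//2 : a < b < n, b-a odd, lines[a] != lines[b]}
def badList (lines : List (List Char)) : List Int :=
  (PySem.List.pyRange 0 (lines.length : Int) 1).flatMap (fun a =>
    ((PySem.List.pyRange (a + 1) (lines.length : Int) 2).filter (fun b =>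
      !(PySem.List.pyGetD lines a [] == PySem.List.pyGetD lines b []))).map
      (fun b => PySem.Int.floordiv (a + b + 1) 2))

def mirrorsB (lines : List (List Char)) : List Int :=
  let bad : PySem.Set Int := PySem.Set.ofList (badList lines)
  0 :: (PySem.List.pyRange 1 (lines.length : Int) 1).filter
    (fun i => !(PySem.Set.contains bad i))

-- zip(*g): columns truncated to the shortest row (exact port of Python zip semantics)
def pvCols (rows : List (List Char)) : List (List Char) :=
  match rows with
  | [] => []
  | r0 :: _ =>
    let m := rows.foldl (fun acc r => min acc r.length) r0.length
    (List.range m).map (fun j => rows.map (fun r => r.getD j ' '))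

def getrc_alt (g : List String) : List (List Int) :=
  let w := (g.headD "").toList.length
  let rows := g.map (fun s => s.toList.take w)
  let cols := pvCols (g.map String.toList)
  [mirrorsB rows, mirrorsB cols]

-- ===== PRECONDITION & SPEC =====
-- Pre_ excludes the empty grid (A raises IndexError on g[0]) and grids with a row shorter than
-- row 0: there A usually raises IndexError mid-scan, and when an earlier mismatch happens to cut
-- the scan short A returns a value whose remaining comparisons were never performed — an accident
-- of the scan order that B does not reproduce (see cites).
def Pre_getrc (g : List String) : Prop :=
  g ≠ [] ∧ ∀ s ∈ g, (g.headD "").toList.length ≤ s.toList.length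
instance (g : List String) : Decidable (Pre_getrc g) := by unfold Pre_getrc; infer_instance

def pvWitness_getrc : List String := ["ab", "ab", "cde"]

def Spec_getrc (g : List String) (out : List (List Int)) : Prop := out = getrc_alt g
instance (g : List String) (out : List (List Int)) : Decidable (Spec_getrc g out) := by unfold Spec_getrc; infer_instance

-- ===== CLAIM (what is proved, stated in full; the proofs are below) =====
def Claim_equal_getrc : Prop := ∀ (g : List String), Dom_getrc g → Pre_getrc g → Spec_getrc g (getrc g)

-- ===== LEMMAS AND PROOFS =====

lemma pvCell_ofNat (g : List String) (i c : Nat) :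
    pvCell g (i : Int) (c : Int) = ((g.map String.toList).getD i []).getD c ' ' := by
  simp [pvCell, PySem.List.pyGet?_natCast, PySem.List.pyGetD_natCast]
  cases h : g[i]? with
  | none => simp
  | some s => simp

lemma loopAll_iff (e : Int → Int → Char) (L W k : Nat) :
    (((PySem.List.pyRange 0 (min ((L : Int) - k - 1) ((k : Int) + 1)) 1).all (fun d =>
       (PySem.List.pyRange 0 (W : Int) 1).all (fun c =>
         e ((k : Int) - d) c == e (1 + k + d) c))) = true)
    ↔ (∀ j : Nat, j < min (k + 1) (L - (k + 1)) → ∀ c : Nat, c < W →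
         e ((k - j : Nat) : Int) ((c : Nat) : Int) = e (((k + 1 + j : Nat) : Int)) ((c : Nat) : Int)) := by
  simp only [List.all_eq_true, PySem.List.mem_pyRange_one, beq_iff_eq]
  constructor
  · intro h j hj c hc
    have h1 := h (j : Int) ⟨by omega, by omega⟩ (c : Int) ⟨by omega, by omega⟩
    have e1 : ((k : Int) - j) = ((k - j : Nat) : Int) := by omega
    have e2 : ((1 : Int) + k + j) = ((k + 1 + j : Nat) : Int) := by push_cast; ring
    rw [e1, e2] at h1; exact h1
  · intro h d hd c hc
    have h1 := h d.toNat (by omega) c.toNat (by omega)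
    have e1 : ((k - d.toNat : Nat) : Int) = (k : Int) - d := by omega
    have e2 : ((k + 1 + d.toNat : Nat) : Int) = 1 + k + d := by omega
    have e3 : ((c.toNat : Nat) : Int) = c := by omega
    rw [e1, e2, e3] at h1; exact h1

lemma mem_badList (lines : List (List Char)) (x : Int) :
    x ∈ badList lines ↔ ∃ a b : Nat, a < b ∧ b < lines.length ∧
      lines.getD a [] ≠ lines.getD b [] ∧ 2 * x = (a : Int) + b + 1 := by
  unfold badList
  simp only [List.mem_flatMap, List.mem_map, List.mem_filter,
    PySem.List.mem_pyRange_one, Bool.not_eq_eq_eq_not, Bool.not_true, beq_eq_false_iff_ne,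
    ne_eq]
  constructor
  · rintro ⟨a, ⟨ha0, haL⟩, b, ⟨hb, hne⟩, rfl⟩
    rw [PySem.List.mem_pyRange_iff_of_pos (by norm_num)] at hb
    obtain ⟨hab, hbL, hdvd⟩ := hb
    refine ⟨a.toNat, b.toNat, by omega, by omega, ?_, ?_⟩
    · rw [PySem.List.pyGetD_of_nonneg lines [] ha0,
          PySem.List.pyGetD_of_nonneg lines [] (by omega : (0:Int) ≤ b)] at hne
      exact hne
    · rw [PySem.Int.floordiv_eq_ediv_of_pos (by norm_num)]
      omega
  · rintro ⟨a, b, hab, hbL, hne, hx⟩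
    refine ⟨(a : Int), ⟨by omega, by omega⟩, (b : Int), ⟨?_, ?_⟩, ?_⟩
    · rw [PySem.List.mem_pyRange_iff_of_pos (by norm_num)]
      exact ⟨by omega, by omega, by omega⟩
    · rw [PySem.List.pyGetD_natCast, PySem.List.pyGetD_natCast]
      exact hne
    · rw [PySem.Int.floordiv_eq_ediv_of_pos (by norm_num)]
      omega

lemma cond_eq (lines : List (List Char)) (e : Int → Int → Char) (L W : Nat)
    (hL : lines.length = L)
    (hW : ∀ r ∈ lines, r.length = W)
    (hcell : ∀ i c : Nat, i < L → c < W → e (i : Int) (c : Int) = (lines.getD i []).getD c ' ')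
    (k : Nat) (hk : k < L - 1) :
    ((!(PySem.List.pyRange 0 (min ((L : Int) - k - 1) ((k : Int) + 1)) 1).isEmpty) &&
      ((PySem.List.pyRange 0 (min ((L : Int) - k - 1) ((k : Int) + 1)) 1).all (fun d =>
        (PySem.List.pyRange 0 (W : Int) 1).all (fun c =>
          e ((k : Int) - d) c == e (1 + k + d) c))))
    = (!(PySem.Set.contains (PySem.Set.ofList (badList lines)) ((k : Int) + 1))) := by
  have hne : (!(PySem.List.pyRange 0 (min ((L : Int) - k - 1) ((k : Int) + 1)) 1).isEmpty) = true := by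
    have hlen := PySem.List.length_pyRange_one 0 (min ((L : Int) - k - 1) ((k : Int) + 1))
    have hpos : 0 < (PySem.List.pyRange 0 (min ((L : Int) - k - 1) ((k : Int) + 1)) 1).length := by
      rw [hlen]; omega
    simp only [Bool.not_eq_true', List.isEmpty_eq_false_iff_exists_mem]
    rcases List.exists_mem_of_length_pos hpos with ⟨x, hx⟩
    exact ⟨x, hx⟩
  rw [hne, Bool.true_and]
  apply Bool.eq_iff_iff.mpr
  rw [loopAll_iff e L W k]
  rw [Bool.not_eq_eq_eq_not, Bool.not_true, ← Bool.not_eq_true,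
      PySem.Set.contains_iff, PySem.Set.mem_ofList, mem_badList]
  constructor
  · intro h hbad
    obtain ⟨a, b, hab, hbL, hne2, hx⟩ := hbad
    -- a + b = 2k + 1, so a = k - j, b = k + 1 + j with j = b - (k+1)
    have hbk : k + 1 ≤ b := by omega
    have hak : a = k - (b - (k + 1)) := by omega
    set j := b - (k + 1) with hj
    have hjlt : j < min (k + 1) (L - (k + 1)) := by omega
    apply hne2
    have hlenA : (lines.getD a []).length = W := by
      rw [List.getD_eq_getElem _ _ (by omega)]
      exact hW _ (List.getElem_mem _)
    have hlenB : (lines.getD b []).length = W := by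
      rw [List.getD_eq_getElem _ _ (by omega)]
      exact hW _ (List.getElem_mem _)
    apply List.ext_getElem (by rw [hlenA, hlenB])
    intro c hc1 hc2
    have hcW : c < W := by omega
    have := h j hjlt c hcW
    rw [hcell _ _ (by omega) hcW, hcell _ _ (by omega) hcW] at this
    have ea : k - j = a := by omega
    have eb : k + 1 + j = b := by omega
    rw [ea, eb] at this
    rw [← List.getD_eq_getElem _ ' ' , ← List.getD_eq_getElem _ ' ']
    · exact this
  · intro h j hj c hc
    have hcc : ¬ (lines.getD (k - j) [] ≠ lines.getD (k + 1 + j) []) := by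
      intro hne2
      exact h ⟨k - j, k + 1 + j, by omega, by omega, hne2, by omega⟩
    rw [not_not] at hcc
    rw [hcell _ _ (by omega) hc, hcell _ _ (by omega) hc, hcc]

lemma map_shift_filter (l : List Int) (cond pred : Int → Bool)
    (h : ∀ x ∈ l, cond x = pred (x + 1)) :
    (l.filter cond).map (fun r => r + 1) = (l.map (fun r => r + 1)).filter pred := by
  induction l with
  | nil => rfl
  | cons x xs ih =>
    simp only [List.filter_cons, List.map_cons, h x (by simp)]
    cases hpx : pred (x + 1) with
    | true => simp [ih (fun y hy => h y (by simp [hy]))]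
    | false => simp [ih (fun y hy => h y (by simp [hy]))]

lemma pyRange_map_shift (a b : Int) :
    (PySem.List.pyRange a b 1).map (fun r => r + 1) = PySem.List.pyRange (a + 1) (b + 1) 1 := by
  rw [PySem.List.pyRange_one a b, PySem.List.pyRange_one (a + 1) (b + 1), List.map_map]
  have ht : (b + 1 - (a + 1)).toNat = (b - a).toNat := by omega
  rw [ht]
  apply List.map_congr_left
  intro x _
  simp only [Function.comp_apply]
  ring

lemma fold_eq (L : Nat) (cond : Int → Bool) (lines : List (List Char)) (hL : lines.length = L)
    (h : ∀ k : Nat, k < L - 1 → cond (k : Int) =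
      (!(PySem.Set.contains (PySem.Set.ofList (badList lines)) ((k : Int) + 1)))) :
    (PySem.List.pyRange 0 ((L : Int) - 1) 1).foldl
      (fun acc r => if cond r then acc ++ [r + 1] else acc) [0] = mirrorsB lines := by
  unfold mirrorsB
  rw [hL]
  rw [PySem.List.foldl_append_if cond (fun r => r + 1)]
  have e0 : ([0] : List Int) ++ ((PySem.List.pyRange 0 ((L : Int) - 1) 1).filter cond).map (fun r => r + 1)
      = 0 :: ((PySem.List.pyRange 0 ((L : Int) - 1) 1).filter cond).map (fun r => r + 1) := rfl
  rw [e0]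
  congr 1
  have hc : ∀ x ∈ PySem.List.pyRange 0 ((L : Int) - 1) 1,
      cond x = (!(PySem.Set.contains (PySem.Set.ofList (badList lines)) (x + 1))) := by
    intro x hx
    rw [PySem.List.mem_pyRange_one] at hx
    have hx' : x = (x.toNat : Int) := by omega
    rw [hx']
    exact h x.toNat (by omega)
  rw [map_shift_filter _ cond (fun i => !(PySem.Set.contains (PySem.Set.ofList (badList lines)) i)) hc, pyRange_map_shift]
  have e1 : ((L : Int) - 1 + 1) = (L : Int) := by ring
  rw [zero_add, e1]

lemma foldl_min_const (l : List (List Char)) (W : Nat) (h : ∀ r ∈ l, W ≤ r.length) :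
    l.foldl (fun acc r => min acc r.length) W = W := by
  induction l with
  | nil => rfl
  | cons x xs ih =>
    simp only [List.foldl_cons, min_eq_left (h x (by simp))]
    exact ih (fun y hy => h y (by simp [hy]))

lemma pvCols_spec (rows : List (List Char)) (hne : rows ≠ []) (W : Nat)
    (hhead : (rows.headD []).length = W) (h : ∀ r ∈ rows, W ≤ r.length) :
    pvCols rows = (List.range W).map (fun j => rows.map (fun r => r.getD j ' ')) := by
  obtain ⟨r0, rest, rfl⟩ := List.exists_cons_of_ne_nil hne
  simp only [List.headD_cons] at hhead
  unfold pvCols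
  simp only [List.foldl_cons]
  rw [hhead, min_self]
  rw [foldl_min_const rest W (fun y hy => h y (by simp [hy]))]

lemma pvCols_length (rows : List (List Char)) (hne : rows ≠ []) (W : Nat)
    (hhead : (rows.headD []).length = W) (h : ∀ r ∈ rows, W ≤ r.length) :
    (pvCols rows).length = W := by
  rw [pvCols_spec rows hne W hhead h]; simp

lemma pvCols_rowlen (rows : List (List Char)) (hne : rows ≠ []) (W : Nat)
    (hhead : (rows.headD []).length = W) (h : ∀ r ∈ rows, W ≤ r.length) :
    ∀ r ∈ pvCols rows, r.length = rows.length := by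
  rw [pvCols_spec rows hne W hhead h]
  intro r hr
  obtain ⟨j, _, rfl⟩ := List.mem_map.mp hr
  simp

lemma getD_take_eq (x : List Char) (w c : Nat) (hc : c < w) :
    (x.take w).getD c ' ' = x.getD c ' ' := by
  rcases lt_or_ge c x.length with hcl | hcl
  · rw [List.getD_eq_getElem _ _ (by simp; omega), List.getElem_take,
        List.getD_eq_getElem _ _ hcl]
  · rw [List.getD_eq_default _ _ (by simp; omega), List.getD_eq_default _ _ hcl]

lemma pvCols_cell (rows : List (List Char)) (hne : rows ≠ []) (W : Nat)
    (hhead : (rows.headD []).length = W) (h : ∀ r ∈ rows, W ≤ r.length)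
    (j c : Nat) (hj : j < W) (hc : c < rows.length) :
    ((pvCols rows).getD j []).getD c ' ' = (rows.getD c []).getD j ' ' := by
  rw [pvCols_spec rows hne W hhead h]
  have h1 : ((List.range W).map (fun j => rows.map (fun r => r.getD j ' '))).getD j []
      = rows.map (fun r => r.getD j ' ') := by
    rw [List.getD_eq_getElem _ _ (by simpa using hj), List.getElem_map, List.getElem_range]
  rw [h1]
  rw [List.getD_eq_getElem _ _ (by simpa using hc), List.getElem_map]
  rw [List.getD_eq_getElem _ _ hc]

set_option maxHeartbeats 1600000 in
lemma getrc_eq_alt_of_pre (g : List String) (hpre : Pre_getrc g) : getrc g = getrc_alt g := by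
  obtain ⟨hne, hge⟩ := hpre
  have hmapne : g.map String.toList ≠ [] := by simpa using hne
  have hhead : (g.map String.toList).headD [] = (g.headD "").toList := by
    cases g with
    | nil => exact absurd rfl hne
    | cons s rest => simp
  have hheadlen : ((g.map String.toList).headD []).length = (g.headD "").toList.length := by
    rw [hhead]
  have hgemap : ∀ r ∈ g.map String.toList, (g.headD "").toList.length ≤ r.length := by
    intro r hr
    obtain ⟨s, hs, rfl⟩ := List.mem_map.mp hr
    exact hge s hs
  have hlen1 : (g.map (fun s => s.toList.take (g.headD "").toList.length)).length = g.length := by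
    simp
  have hW1 : ∀ r ∈ g.map (fun s => s.toList.take (g.headD "").toList.length),
      r.length = (g.headD "").toList.length := by
    intro r hr
    obtain ⟨s, hs, rfl⟩ := List.mem_map.mp hr
    rw [List.length_take]
    exact Nat.min_eq_left (hge s hs)
  have hlenc : (pvCols (g.map String.toList)).length = (g.headD "").toList.length :=
    pvCols_length _ hmapne _ hheadlen hgemap
  have hWc : ∀ r ∈ pvCols (g.map String.toList), r.length = g.length := by
    intro r hr
    rw [pvCols_rowlen _ hmapne _ hheadlen hgemap r hr]
    simp
  have hcellrows : ∀ i c : Nat, i < g.length → c < (g.headD "").toList.length →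
      pvCell g (i : Int) (c : Int) =
        (((g.map (fun s => s.toList.take (g.headD "").toList.length)).getD i []).getD c ' ') := by
    intro i c hi hc
    rw [pvCell_ofNat g i c]
    rw [List.getD_eq_getElem (g.map String.toList) _ (by simpa using hi),
        List.getElem_map]
    rw [List.getD_eq_getElem (g.map fun s => s.toList.take (g.headD "").toList.length) _
          (by simpa using hi),
        List.getElem_map]
    rw [getD_take_eq _ _ _ hc]
  have hcellcols : ∀ i c : Nat, i < (g.headD "").toList.length → c < g.length →
      pvCell g (c : Int) (i : Int) =
        (((pvCols (g.map String.toList)).getD i []).getD c ' ') := by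
    intro i c hi hc
    rw [pvCell_ofNat g c i,
        pvCols_cell _ hmapne _ hheadlen hgemap i c hi (by simpa using hc)]
  have hcond1 : ∀ k : Nat, k < g.length - 1 → (fun r => hrA r g) (k : Int) =
      (!(PySem.Set.contains (PySem.Set.ofList (badList
          (g.map (fun s => s.toList.take (g.headD "").toList.length)))) ((k : Int) + 1))) := by
    intro k hk
    simp only [hrA]
    revert hk
    -- abstract the concrete grid data so the application of cond_eq unifies syntactically
    generalize g.map (fun s => s.toList.take (g.headD "").toList.length) = lines at hlen1 hW1 hcellrows ⊢
    generalize g.length = L at hlen1 hcellrows ⊢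
    generalize (g.headD "").toList.length = W at hW1 hcellrows ⊢
    intro hk
    exact cond_eq lines (fun i c => pvCell g i c) L W hlen1 hW1 hcellrows k hk
  have hcond2 : ∀ k : Nat, k < (g.headD "").toList.length - 1 → (fun c => vrA c g) (k : Int) =
      (!(PySem.Set.contains (PySem.Set.ofList (badList
          (pvCols (g.map String.toList)))) ((k : Int) + 1))) := by
    intro k hk
    simp only [vrA]
    revert hk
    generalize pvCols (g.map String.toList) = lines at hlenc hWc hcellcols ⊢
    generalize (g.headD "").toList.length = L at hlenc hcellcols ⊢
    generalize g.length = W at hWc hcellcols ⊢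
    intro hk
    exact cond_eq lines (fun a b => pvCell g b a) L W hlenc hWc hcellcols k hk
  have h1 : (PySem.List.pyRange 0 ((g.length : Int) - 1) 1).foldl
      (fun acc r => if hrA r g then acc ++ [r + 1] else acc) [0]
      = mirrorsB (g.map (fun s => s.toList.take (g.headD "").toList.length)) := by
    generalize g.map (fun s => s.toList.take (g.headD "").toList.length) = lines at hlen1 hcond1 ⊢
    generalize g.length = L at hlen1 hcond1 ⊢
    exact fold_eq L (fun r => hrA r g) lines hlen1 hcond1
  have h2 : (PySem.List.pyRange 0 ((((g.headD "").toList.length : Int)) - 1) 1).foldl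
      (fun acc c => if vrA c g then acc ++ [c + 1] else acc) [0]
      = mirrorsB (pvCols (g.map String.toList)) := by
    generalize pvCols (g.map String.toList) = lines at hlenc hcond2 ⊢
    generalize (g.headD "").toList.length = L at hlenc hcond2 ⊢
    exact fold_eq L (fun c => vrA c g) lines hlenc hcond2
  simp only [getrc, getrc_alt]
  rw [h1, h2]

-- ===== VERDICT (by name: the statement is the Claim_ definition above) =====
theorem getrc_spec : Claim_equal_getrc := by
  intro g _hdom hpre
  exact getrc_eq_alt_of_pre g hpre
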